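-- pv_equiv track=rewrite | github.com/nirbenah/scheduling | src/utils.py | array_to_dict
-- ===== SOURCE A (Python) =====
-- def array_to_dict(array1):
--     result_dict = {}
--     for index, value in enumerate(array1):
--         if value in result_dict:
--             result_dict[value].append(index)
--         else:
--             result_dict[value] = [index]
--     # Sort the dictionary by the keys
--     sorted_dict = {k: v for k, v in sorted(result_dict.items())}
--
--     return sorted_dict
-- ===== SOURCE B (Python) =====
-- def array_to_dict(array1):
--     # Sort (index, value) pairs by value (stable), then collect equal-value runs
--     # in one linear scan; keys come out already in sorted order.
--     pairs = sorted(enumerate(array1), key=lambda p: p[1])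
--     result = {}
--     i = 0
--     n = len(pairs)
--     while i < n:
--         v = pairs[i][1]
--         j = i
--         while j < n and pairs[j][1] == v:
--             j += 1
--         result[v] = [idx for idx, _ in pairs[i:j]]
--         i = j
--     return result
-- ===== Notes on version B (the rewrite author's own statement) =====
-- stated objective: alternative
-- what changed: Replaces A's hash-accumulate-then-sort-keys-then-rebuild with a single stable sort of (index,value) pairs by value followed by one linear run-collecting scan that emits keys already in order.
import Mathlib
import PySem

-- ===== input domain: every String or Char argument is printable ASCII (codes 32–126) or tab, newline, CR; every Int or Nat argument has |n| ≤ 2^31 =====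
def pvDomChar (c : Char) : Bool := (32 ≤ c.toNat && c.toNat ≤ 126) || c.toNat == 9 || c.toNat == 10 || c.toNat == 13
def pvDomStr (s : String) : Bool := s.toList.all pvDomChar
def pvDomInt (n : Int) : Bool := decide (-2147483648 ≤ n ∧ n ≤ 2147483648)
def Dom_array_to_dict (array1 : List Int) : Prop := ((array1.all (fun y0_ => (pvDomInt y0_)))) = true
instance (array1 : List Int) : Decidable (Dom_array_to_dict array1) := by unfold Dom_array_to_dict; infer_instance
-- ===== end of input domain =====

-- B replaces A's hash-accumulate-then-sort-keys-then-rebuild with one stable sort of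
-- (index, value) pairs by value followed by a single run-collecting scan (alternative
-- decomposition, same results).

-- ===== PORT A =====
-- one loop iteration: if value in dict append index, else start a fresh list
def pvStepA (d : PySem.Dict Int (List Int)) (p : Int × Int) : PySem.Dict Int (List Int) :=
  if d.contains p.2 then d.modify p.2 [] (fun l => l ++ [p.1]) else d.insert p.2 [p.1]

-- sorted(result_dict.items()) compares (key, list) tuples; dict keys are distinct, so
-- Python never reaches the list component and the sort key is exactly the key: ported
-- as sorting the items by their first component.
def array_to_dict (array1 : List Int) : List (Int × List Int) :=
  let d := (PySem.List.enumerate array1 0).foldl pvStepA PySem.Dict.empty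
  (PySem.Dict.ofList (PySem.List.sorted d.items (fun p => p.1))).items

-- ===== PORT B =====
-- the outer while loop of Source B: take the run of pairs sharing the current value,
-- emit (value, indices of the run), continue after the run
def pvGroupRuns : List (Int × Int) → List (Int × List Int)
  | [] => []
  | (i, v) :: rest =>
      (v, i :: (rest.takeWhile (fun q => q.2 == v)).map (fun q => q.1)) ::
        pvGroupRuns (rest.dropWhile (fun q => q.2 == v))
termination_by l => l.length
decreasing_by simpa using Nat.lt_succ_of_le (List.length_dropWhile_le _ rest)

def array_to_dict_alt (array1 : List Int) : List (Int × List Int) :=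
  pvGroupRuns (PySem.List.sorted (PySem.List.enumerate array1 0) (fun p => p.2))

-- ===== PRECONDITION & SPEC =====
def Spec_array_to_dict (array1 : List Int) (out : List (Int × List Int)) : Prop := out = array_to_dict_alt array1
instance (array1 : List Int) (out : List (Int × List Int)) : Decidable (Spec_array_to_dict array1 out) := by unfold Spec_array_to_dict; infer_instance

-- ===== CLAIM (what is proved, stated in full; the proofs are below) =====
def Claim_equal_array_to_dict : Prop := ∀ (array1 : List Int), Dom_array_to_dict array1 → Spec_array_to_dict array1 (array_to_dict array1)

-- ===== LEMMAS AND PROOFS =====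

-- the common normal form: strictly increasing distinct values, each paired with the
-- ascending list of its indices in array1
def pvG (array1 : List Int) (k : Int) : Int × List Int :=
  (k, ((PySem.List.enumerate array1 0).filter (fun p => p.2 == k)).map (fun p => p.1))


theorem pv_filter_insertBy {α κ : Type} [LinearOrder κ] [BEq κ] [LawfulBEq κ]
    (key : α → κ) (k : κ) (x : α) (ys : List α)
    (h : ys.Pairwise (fun a b => key a ≤ key b)) :
    (PySem.List.insertBy (fun a b => decide (key a < key b)) x ys).filter
        (fun y => key y == k) =
      ys.filter (fun y => key y == k) ++ if key x == k then [x] else [] := by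
  induction ys with
  | nil =>
    rw [PySem.List.insertBy]
    by_cases hk : key x == k <;> simp [hk]
  | cons y ys ih =>
    rw [PySem.List.insertBy]
    rcases List.pairwise_cons.mp h with ⟨hy, hys⟩
    by_cases hlt : decide (key x < key y) = true
    · rw [if_pos hlt]
      have hxy : key x < key y := by simpa using hlt
      by_cases hk : key x == k
      · have hkeq : key x = k := by simpa using hk
        have hnil : (y :: ys).filter (fun y => key y == k) = [] := by
          rw [List.filter_eq_nil_iff]
          intro z hz
          have hxz : key x < key z := by
            rcases List.mem_cons.mp hz with rfl | hz
            · exact hxy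
            · exact lt_of_lt_of_le hxy (hy z hz)
          simp only [beq_iff_eq]
          exact fun he => absurd (hkeq ▸ he) (ne_of_gt hxz)
        rw [List.filter_cons, if_pos hk, hnil, if_pos hk]
        rfl
      · rw [List.filter_cons, if_neg hk, if_neg hk, List.append_nil]
    · rw [if_neg hlt, List.filter_cons, List.filter_cons, ih hys]
      by_cases hyk : key y == k
      · rw [if_pos hyk, if_pos hyk]; rfl
      · rw [if_neg hyk, if_neg hyk]

theorem pv_insertBy_pairwise {α κ : Type} [LinearOrder κ] (key : α → κ) (x : α) (ys : List α)
    (h : ys.Pairwise (fun a b => key a ≤ key b)) :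
    (PySem.List.insertBy (fun a b => decide (key a < key b)) x ys).Pairwise
      (fun a b => key a ≤ key b) := by
  induction ys with
  | nil => simp [PySem.List.insertBy]
  | cons y ys ih =>
    rw [PySem.List.insertBy]
    rcases List.pairwise_cons.mp h with ⟨hy, hys⟩
    split_ifs with hlt
    · refine List.pairwise_cons.mpr ⟨?_, h⟩
      intro z hz
      rcases List.mem_cons.mp hz with rfl | hz
      · exact le_of_lt (by simpa using hlt)
      · exact le_trans (le_of_lt (by simpa using hlt)) (hy z hz)
    · refine List.pairwise_cons.mpr ⟨?_, ih hys⟩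
      intro z hz
      rcases (PySem.List.mem_insertBy _ _ _ _).mp hz with rfl | hz
      · simpa using hlt
      · exact hy z hz

theorem pv_foldl_insertBy_filter {α κ : Type} [LinearOrder κ] [BEq κ] [LawfulBEq κ]
    (key : α → κ) (k : κ) (xs : List α) (acc : List α)
    (h : acc.Pairwise (fun a b => key a ≤ key b)) :
    (xs.foldl (fun acc x => PySem.List.insertBy (fun a b => decide (key a < key b)) x acc)
        acc).filter (fun y => key y == k) =
      acc.filter (fun y => key y == k) ++ xs.filter (fun y => key y == k) := by
  induction xs generalizing acc with
  | nil => simp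
  | cons x xs ih =>
    rw [List.foldl_cons, ih _ (pv_insertBy_pairwise key x acc h),
      pv_filter_insertBy key k x acc h, List.filter_cons, List.append_assoc]
    by_cases hk : key x == k
    · rw [if_pos hk, if_pos hk]; rfl
    · rw [if_neg hk, if_neg hk]; rfl

theorem pv_sorted_filter_key {α κ : Type} [LinearOrder κ] [BEq κ] [LawfulBEq κ]
    (xs : List α) (key : α → κ) (k : κ) :
    (PySem.List.sorted xs key).filter (fun y => key y == k) =
      xs.filter (fun y => key y == k) := by
  rw [PySem.List.sorted_eq_foldl_insertBy, pv_foldl_insertBy_filter key k xs [] (by simp)]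
  rfl

theorem pvStepA_eq : pvStepA = fun d p => d.modify p.2 [] (fun l => l ++ [p.1]) := by
  funext d p
  unfold pvStepA
  split_ifs with h
  · rfl
  · simp [PySem.Dict.modify, PySem.Dict.getD_of_not_contains d [] (by simpa using h)]

theorem pv_lemA (array1 : List Int) :
    array_to_dict array1 =
      (PySem.List.sorted (PySem.Set.ofList array1) (fun k => k)).map (pvG array1) := by
  unfold array_to_dict
  rw [pvStepA_eq]
  set enum := PySem.List.enumerate array1 0 with henum
  set d := enum.foldl (fun d p => d.modify p.2 [] (fun l => l ++ [p.1])) PySem.Dict.empty with hd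
  -- keys of d
  have hkeys : d.keys = PySem.Set.ofList array1 := by
    rw [hd]
    rw [PySem.Dict.keys_foldl_modify_key enum (fun p => p.2) [] (fun _ p l => l ++ [p.1])
      PySem.Dict.empty]
    rw [PySem.Dict.keys_empty, PySem.List.map_snd_enumerate, PySem.Set.ofList_eq_foldl]
    rfl
  have hnodup : d.keys.Nodup := by
    rw [hkeys]; exact PySem.Set.nodup_ofList array1
  -- lookup of d
  have hgetD : ∀ k, d.getD k [] = (enum.filter (fun p => p.2 == k)).map (fun p => p.1) := by
    intro k
    have hswap : d = (enum.map Prod.swap).foldl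
        (fun d q => d.modify q.1 [] (fun l => l ++ [q.2])) PySem.Dict.empty := by
      rw [hd, List.foldl_map]
      rfl
    rw [hswap, PySem.Dict.getD_foldl_modify_append]
    simp [List.filter_map, Function.comp_def, Prod.swap]
  -- items of d
  have hitems : d.items = d.keys.map (pvG array1) := by
    rw [PySem.Dict.items_eq_map_keys d hnodup []]
    exact List.map_congr_left (fun k _ => by rw [pvG, hgetD k])
  -- the sort
  have hsorted : PySem.List.sorted d.items (fun p => p.1) =
      (PySem.List.sorted (PySem.Set.ofList array1) (fun k => k)).map (pvG array1) := by
    apply PySem.List.sorted_eq_of_perm_of_pairwise_lt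
    · rw [hitems, hkeys]
      exact (PySem.List.sorted_perm (PySem.Set.ofList array1) (fun k => k) false).map _
    · rw [List.pairwise_map]
      have := PySem.List.sorted_ofList_pairwise_lt (κ := Int) array1
      exact this.imp (fun {a b} hab => by simpa [pvG] using hab)
  show (PySem.Dict.ofList (PySem.List.sorted d.items (fun p => p.1))).items =
      (PySem.List.sorted (PySem.Set.ofList array1) (fun k => k)).map (pvG array1)
  rw [hsorted]
  -- rebuilding the dict from strictly-sorted distinct keys keeps the items
  have hfresh := PySem.Dict.items_foldl_insert_fresh
    ((PySem.List.sorted (PySem.Set.ofList array1) (fun k => k)).map (pvG array1))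
    (fun q => q.1) (fun q => q.2) (PySem.Dict.empty (κ := Int) (ν := List Int))
    (fun a _ => PySem.Dict.contains_empty a.1)
    (by
      rw [List.map_map]
      have : ((fun q : Int × List Int => q.1) ∘ pvG array1) = fun k => k := by
        funext k; rfl
      rw [this]
      simpa using (PySem.List.sorted_ofList_pairwise_lt (κ := Int) array1).nodup)
  rw [PySem.Dict.ofList, PySem.Dict.update]
  rw [hfresh]
  simp [PySem.Dict.empty, Function.comp_def]

theorem pv_dropWhile_gt (v : Int) (rest : List (Int × Int))
    (hv : ∀ q ∈ rest, v ≤ q.2) (hpw : rest.Pairwise (fun a b => a.2 ≤ b.2)) :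
    ∀ q ∈ rest.dropWhile (fun q => q.2 == v), v < q.2 := by
  induction rest with
  | nil => simp
  | cons r rs ih =>
    rw [List.dropWhile_cons]
    rcases List.pairwise_cons.mp hpw with ⟨hr, hrs⟩
    split_ifs with hrv
    · exact ih (fun q hq => hv q (List.mem_cons_of_mem r hq)) hrs
    · intro q hq
      have hvr : v < r.2 :=
        lt_of_le_of_ne (hv r (List.mem_cons_self)) (fun he => hrv (by simp [he]))
      rcases List.mem_cons.mp hq with rfl | hq
      · exact hvr
      · exact lt_of_lt_of_le hvr (hr q hq)

theorem pvGroupRuns_spec (ps : List (Int × Int)) (h : ps.Pairwise (fun a b => a.2 ≤ b.2)) :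
    (pvGroupRuns ps).Pairwise (fun a b => a.1 < b.1) ∧
    (∀ k, k ∈ (pvGroupRuns ps).map (fun q => q.1) ↔ k ∈ ps.map (fun p => p.2)) ∧
    (∀ q ∈ pvGroupRuns ps,
        q.2 = (ps.filter (fun p => p.2 == q.1)).map (fun p => p.1)) := by
  induction ps using pvGroupRuns.induct with
  | case1 => simp [pvGroupRuns]
  | case2 i v rest ih =>
    rcases List.pairwise_cons.mp h with ⟨hv, hrest⟩
    have hv' : ∀ q ∈ rest, v ≤ q.2 := by intro q hq; exact hv q hq
    have hsplit : rest.takeWhile (fun q => q.2 == v) ++ rest.dropWhile (fun q => q.2 == v)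
        = rest := List.takeWhile_append_dropWhile
    have hrun : ∀ q ∈ rest.takeWhile (fun q => q.2 == v), q.2 = v := by
      intro q hq
      simpa using List.mem_takeWhile_imp hq
    have hpw' : (rest.dropWhile (fun q => q.2 == v)).Pairwise (fun a b => a.2 ≤ b.2) :=
      hrest.sublist (List.dropWhile_sublist _)
    have hgt := pv_dropWhile_gt v rest hv' hrest
    obtain ⟨ihpw, ihmem, ihval⟩ := ih hpw'
    rw [pvGroupRuns]
    refine ⟨?_, ?_, ?_⟩
    · refine List.pairwise_cons.mpr ⟨?_, ihpw⟩
      intro q' hq'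
      have hk : q'.1 ∈ (rest.dropWhile (fun q => q.2 == v)).map (fun p => p.2) :=
        (ihmem q'.1).mp (List.mem_map_of_mem hq')
      rcases List.mem_map.mp hk with ⟨q, hq, hqe⟩
      simpa [← hqe] using hgt q hq
    · intro k
      simp only [List.map_cons, List.mem_cons, ihmem]
      constructor
      · rintro (rfl | hk)
        · simp
        · rcases List.mem_map.mp hk with ⟨q, hq, rfl⟩
          exact Or.inr (List.mem_map_of_mem ((List.dropWhile_sublist _).mem hq))
      · rintro (hk | hk)
        · exact Or.inl hk
        · rcases List.mem_map.mp hk with ⟨q, hq, rfl⟩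
          rw [← hsplit] at hq
          rcases List.mem_append.mp hq with hq | hq
          · exact Or.inl (hrun q hq)
          · exact Or.inr (List.mem_map_of_mem hq)
    · intro q hq
      rcases List.mem_cons.mp hq with rfl | hq
      · simp only
        have hfilter : rest.filter (fun p => p.2 == v) = rest.takeWhile (fun q => q.2 == v) := by
          rw [← hsplit, List.filter_append]
          have h1 : (rest.takeWhile (fun q => q.2 == v)).filter (fun p => p.2 == v)
              = rest.takeWhile (fun q => q.2 == v) :=
            List.filter_eq_self.mpr (fun q hq => by simp [hrun q hq])
          have h2 : (rest.dropWhile (fun q => q.2 == v)).filter (fun p => p.2 == v) = [] :=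
            List.filter_eq_nil_iff.mpr (fun q hq => by
              have := hgt q hq; simp; omega)
          rw [h1, h2, List.append_nil, hsplit]
        rw [List.filter_cons]
        simp only [beq_self_eq_true, if_pos]
        rw [hfilter, List.map_cons]
      · have hqk : v < q.1 := by
          have hk : q.1 ∈ (rest.dropWhile (fun q => q.2 == v)).map (fun p => p.2) :=
            (ihmem q.1).mp (List.mem_map_of_mem hq)
          rcases List.mem_map.mp hk with ⟨q', hq', hqe⟩
          simpa [← hqe] using hgt q' hq'
        rw [ihval q hq, List.filter_cons]
        rw [if_neg (by simp; omega)]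
        congr 1
        rw [← hsplit, List.filter_append]
        have h2 : (rest.takeWhile (fun q => q.2 == v)).filter (fun p => p.2 == q.1) = [] :=
          List.filter_eq_nil_iff.mpr (fun q' hq' => by
            have := hrun q' hq'; simp [this]; omega)
        rw [h2, List.nil_append, hsplit]

theorem pv_lemB (array1 : List Int) :
    array_to_dict_alt array1 =
      (PySem.List.sorted (PySem.Set.ofList array1) (fun k => k)).map (pvG array1) := by
  unfold array_to_dict_alt
  set enum := PySem.List.enumerate array1 0 with henum
  set ps := PySem.List.sorted enum (fun p => p.2) with hps
  have hpw : ps.Pairwise (fun a b => a.2 ≤ b.2) := PySem.List.sorted_pairwise enum (fun p => p.2)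
  obtain ⟨hgpw, hgmem, hgval⟩ := pvGroupRuns_spec ps hpw
  have hFpw : ((pvGroupRuns ps).map (fun q => q.1)).Pairwise (fun a b => a < b) :=
    List.pairwise_map.mpr hgpw
  have hFnodup : ((pvGroupRuns ps).map (fun q => q.1)).Nodup :=
    hFpw.imp (fun hab => ne_of_lt hab)
  have hmemF : ∀ k, k ∈ (pvGroupRuns ps).map (fun q => q.1) ↔ k ∈ PySem.Set.ofList array1 := by
    intro k
    rw [hgmem k, PySem.Set.mem_ofList]
    have hperm : (ps.map (fun p => p.2)).Perm array1 := by
      have := (PySem.List.sorted_perm enum (fun p => p.2) false).map (fun p : Int × Int => p.2)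
      rw [henum, PySem.List.map_snd_enumerate] at this
      exact this
    exact hperm.mem_iff
  have hperm : ((pvGroupRuns ps).map (fun q => q.1)).Perm (PySem.Set.ofList array1) :=
    List.perm_of_nodup_nodup_toFinset_eq hFnodup (PySem.Set.nodup_ofList array1)
      (Finset.ext (fun k => by simp only [List.mem_toFinset]; exact hmemF k))
  have hS : PySem.List.sorted (PySem.Set.ofList array1) (fun k => k)
      = (pvGroupRuns ps).map (fun q => q.1) :=
    PySem.List.sorted_eq_of_perm_of_pairwise_lt _ _ _ hperm hFpw
  rw [hS, List.map_map]
  have hpt : ∀ q ∈ pvGroupRuns ps, (pvG array1 ∘ fun q => q.1) q = id q := by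
    intro q hq
    have hstab : ps.filter (fun p => p.2 == q.1) = enum.filter (fun p => p.2 == q.1) := by
      rw [hps]
      exact pv_sorted_filter_key enum (fun p => p.2) q.1
    have : pvG array1 q.1 = (q.1, q.2) := by
      rw [pvG, hgval q hq, hstab, henum]
    simpa using this
  rw [List.map_congr_left hpt, List.map_id]

-- ===== VERDICT (by name: the statement is the Claim_ definition above) =====
theorem array_to_dict_spec : Claim_equal_array_to_dict := by
  intro array1 _
  unfold Spec_array_to_dict
  rw [pv_lemA, pv_lemB]
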